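-- pv_equiv track=rewrite | github.com/armor-2025/wardrobe-api | tailored_recommendations.py | _are_colors_similar
-- ===== SOURCE A (Python) =====
-- from typing import List, Dict, Any, Optional
--
-- def _are_colors_similar(color1: str, color_list: List[str]) -> bool:
--     """
--     Check if colors are similar (e.g., navy and blue, grey and black)
--     """
--     color_families = {
--         'black': ['charcoal', 'grey', 'gray'],
--         'white': ['cream', 'ivory', 'beige'],
--         'blue': ['navy', 'denim', 'cobalt'],
--         'red': ['burgundy', 'maroon', 'wine'],
--         'green': ['olive', 'forest', 'sage']
--     }
--
--     for color in color_list: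
--         if color in color_families.get(color1, []):
--             return True
--         if color1 in color_families.get(color, []):
--             return True
--
--     return False
-- ===== SOURCE B (Python) =====
-- from typing import List
--
-- def _are_colors_similar(color1: str, color_list: List[str]) -> bool:
--     color_families = {
--         'black': ['charcoal', 'grey', 'gray'],
--         'white': ['cream', 'ivory', 'beige'],
--         'blue': ['navy', 'denim', 'cobalt'],
--         'red': ['burgundy', 'maroon', 'wine'],
--         'green': ['olive', 'forest', 'sage']
--     }
--     similar = set(color_families.get(color1, []))
--     for family, members in color_families.items():
--         if color1 in members:
--             similar.add(family)
--     return any(c in similar for c in color_list)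
-- ===== Notes on version B (the rewrite author's own statement) =====
-- stated objective: simpler
-- what changed: B materialises the full set of colors similar to color1 once (forward family members plus reverse family keys) and then makes a single set-membership pass over color_list, instead of A's two directional dict lookups and list scans per element.
import Mathlib
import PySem

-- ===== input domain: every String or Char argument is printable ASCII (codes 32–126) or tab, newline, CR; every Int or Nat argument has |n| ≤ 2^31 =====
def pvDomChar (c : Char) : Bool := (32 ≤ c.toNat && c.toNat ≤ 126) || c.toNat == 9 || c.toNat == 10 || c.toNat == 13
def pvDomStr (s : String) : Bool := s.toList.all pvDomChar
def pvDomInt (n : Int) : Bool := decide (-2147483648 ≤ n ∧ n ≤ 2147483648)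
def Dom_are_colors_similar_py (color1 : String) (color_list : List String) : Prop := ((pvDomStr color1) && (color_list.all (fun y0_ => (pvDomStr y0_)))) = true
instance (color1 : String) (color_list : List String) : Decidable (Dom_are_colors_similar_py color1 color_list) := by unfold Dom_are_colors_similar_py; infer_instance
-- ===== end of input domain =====

-- B precomputes the full similarity set for color1 once (forward members plus reverse keys) and makes a single membership pass over color_list; a simpler decomposition, same result.

-- ===== PORT A =====
def pvFamA : PySem.Dict String (List String) := PySem.Dict.ofList
  [("black", ["charcoal", "grey", "gray"]),
   ("white", ["cream", "ivory", "beige"]),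
   ("blue",  ["navy", "denim", "cobalt"]),
   ("red",   ["burgundy", "maroon", "wine"]),
   ("green", ["olive", "forest", "sage"])]

-- the 'for color in color_list' loop with its two early returns
def pvLoopA (color1 : String) : List String → Bool
  | [] => false
  | color :: rest =>
    if (pvFamA.getD color1 []).contains color then true
    else if (pvFamA.getD color []).contains color1 then true
    else pvLoopA color1 rest

def are_colors_similar_py (color1 : String) (color_list : List String) : Bool :=
  pvLoopA color1 color_list

-- ===== PORT B =====
def pvFamB : PySem.Dict String (List String) := PySem.Dict.ofList
  [("black", ["charcoal", "grey", "gray"]),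
   ("white", ["cream", "ivory", "beige"]),
   ("blue",  ["navy", "denim", "cobalt"]),
   ("red",   ["burgundy", "maroon", "wine"]),
   ("green", ["olive", "forest", "sage"])]

def are_colors_similar_py_alt (color1 : String) (color_list : List String) : Bool :=
  let similar : PySem.Set String :=
    pvFamB.items.foldl
      (fun s kv => if kv.2.contains color1 then PySem.Set.add s kv.1 else s)
      (PySem.Set.ofList (pvFamB.getD color1 []))
  color_list.any (fun c => PySem.Set.contains similar c)

-- ===== PRECONDITION & SPEC =====
def Spec_are_colors_similar_py (color1 : String) (color_list : List String) (out : Bool) : Prop := out = are_colors_similar_py_alt color1 color_list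
instance (color1 : String) (color_list : List String) (out : Bool) : Decidable (Spec_are_colors_similar_py color1 color_list out) := by unfold Spec_are_colors_similar_py; infer_instance

-- ===== CLAIM (what is proved, stated in full; the proofs are below) =====
def Claim_equal_are_colors_similar_py : Prop := ∀ (color1 : String) (color_list : List String), Dom_are_colors_similar_py color1 color_list → Spec_are_colors_similar_py color1 color_list (are_colors_similar_py color1 color_list)

-- ===== LEMMAS AND PROOFS =====

-- the two ports build the same literal dict
theorem pvFam_eq : pvFamB = pvFamA := by decide

-- A's early-return loop is `any` of its per-element test
theorem pvLoopA_eq_any (color1 : String) (l : List String) :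
    pvLoopA color1 l =
      l.any (fun c => (pvFamA.getD color1 []).contains c || (pvFamA.getD c []).contains color1) := by
  induction l with
  | nil => rfl
  | cons c rest ih =>
    simp only [pvLoopA, List.any_cons, ← ih]
    simp [Bool.or_assoc]

-- membership in B's conditional-add fold over any item list
theorem contains_foldl_addIf (color1 c : String) (l : List (String × List String)) (s : PySem.Set String) :
    PySem.Set.contains (l.foldl (fun s kv => if kv.2.contains color1 then PySem.Set.add s kv.1 else s) s) c
    = (PySem.Set.contains s c || l.any (fun kv => kv.2.contains color1 && (kv.1 == c))) := by
  induction l generalizing s with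
  | nil => simp
  | cons kv rest ih =>
    simp only [List.foldl_cons, List.any_cons, ih]
    simp only [List.contains_eq_mem]
    by_cases h : color1 ∈ kv.2 <;>
      simp [h, PySem.Set.mem_add, beq_eq_decide, Bool.or_assoc, Bool.or_comm,
        Bool.or_left_comm, eq_comm]

-- the reverse-key scan over the literal dict equals A's reverse lookup at c
theorem pvReverse_any (color1 c : String) :
    pvFamB.items.any (fun kv => kv.2.contains color1 && (kv.1 == c))
      = (pvFamB.getD c []).contains color1 := by
  have h : pvFamB = PySem.Dict.mk
    [("black", ["charcoal", "grey", "gray"]),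
     ("white", ["cream", "ivory", "beige"]),
     ("blue",  ["navy", "denim", "cobalt"]),
     ("red",   ["burgundy", "maroon", "wine"]),
     ("green", ["olive", "forest", "sage"])] := by decide
  rw [h]
  simp only [PySem.Dict.items, PySem.Dict.getD, PySem.Dict.get?_mk_cons,
    List.any_cons, List.any_nil]
  rcases eq_or_ne c "black" with rfl | h1; · simp
  rcases eq_or_ne c "white" with rfl | h2; · simp
  rcases eq_or_ne c "blue" with rfl | h3; · simp
  rcases eq_or_ne c "red" with rfl | h4; · simp
  rcases eq_or_ne c "green" with rfl | h5; · simp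
  simp [PySem.Dict.get?, beq_eq_decide, h1.symm, h2.symm, h3.symm, h4.symm, h5.symm]

-- pointwise: membership in B's precomputed set equals A's per-element two-way test
theorem pvSimilar_contains (color1 c : String) :
    PySem.Set.contains
      (pvFamB.items.foldl
        (fun s kv => if kv.2.contains color1 then PySem.Set.add s kv.1 else s)
        (PySem.Set.ofList (pvFamB.getD color1 []))) c =
    ((pvFamA.getD color1 []).contains c || (pvFamA.getD c []).contains color1) := by
  rw [contains_foldl_addIf, pvReverse_any, pvFam_eq]
  simp [PySem.Set.mem_ofList]

theorem pv_main (color1 : String) (l : List String) :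
    are_colors_similar_py color1 l = are_colors_similar_py_alt color1 l := by
  simp only [are_colors_similar_py, are_colors_similar_py_alt, pvLoopA_eq_any,
    pvSimilar_contains]

-- ===== VERDICT (by name: the statement is the Claim_ definition above) =====
theorem are_colors_similar_py_spec : Claim_equal_are_colors_similar_py := by
  intro color1 color_list _
  exact pv_main color1 color_list
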